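-- pv_equiv track=rewrite | github.com/qianyunshen/python_sudoku | sudoku.py | createInitialGrid
-- ===== SOURCE A (Python) =====
-- def createInitialGrid(initialState):
--     result = []
--     for i in range(len(initialState)):
--         rows = []
--         for j in range(len(initialState[i])):
--             if '' == initialState[i][j]:
--                 rows += [0]
--             elif initialState[i][j].isdigit() and int(initialState[i][j]) >= 1 and int(initialState[i][j]) <= 9:
--                 rows += [int(initialState[i][j])]
--             else:
--                 return []
--         result += [rows]
--
--     return result
-- ===== SOURCE B (Python) =====
-- def createInitialGrid(initialState):
--     # Stage 1: validate every cell; stage 2: convert the whole grid.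
--     if not all(c == '' or (c.isdigit() and 1 <= int(c) <= 9)
--                for row in initialState for c in row):
--         return []
--     return [[0 if c == '' else int(c) for c in row] for row in initialState]
-- ===== Notes on version B (the rewrite author's own statement) =====
-- stated objective: alternative
-- what changed: Replaced the single accumulator pass with early return on an invalid cell by two staged passes: one whole-grid validation pass (all over a flattened generator), then a separate pure conversion pass over the grid; the accumulator and the escape path disappear.
import Mathlib
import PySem

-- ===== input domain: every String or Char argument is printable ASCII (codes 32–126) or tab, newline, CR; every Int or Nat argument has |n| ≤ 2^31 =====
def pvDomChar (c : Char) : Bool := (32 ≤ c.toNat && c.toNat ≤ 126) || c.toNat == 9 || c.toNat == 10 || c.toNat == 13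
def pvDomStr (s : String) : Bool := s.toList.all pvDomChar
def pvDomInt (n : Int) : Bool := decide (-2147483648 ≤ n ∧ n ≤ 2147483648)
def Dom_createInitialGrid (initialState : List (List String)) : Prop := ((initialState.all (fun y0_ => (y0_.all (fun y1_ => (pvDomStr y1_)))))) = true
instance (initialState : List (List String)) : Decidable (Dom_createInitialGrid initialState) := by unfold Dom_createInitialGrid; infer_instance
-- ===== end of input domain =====

-- ===== PORT A =====
-- A: index loops rendered as structural recursion over rows/cells, accumulators kept,
-- Option.none for the early `return []` escape.
def pvARow : List String → List Int → Option (List Int)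
  | [], rows => some rows
  | c :: rest, rows =>
    if c = "" then pvARow rest (rows ++ [0])
    else
      let v := (PySem.Int.ofStr? c).getD 0
      if PySem.Str.strIsdigit c && decide (1 ≤ v) && decide (v ≤ 9) then
        pvARow rest (rows ++ [v])
      else none

def pvAOuter : List (List String) → List (List Int) → Option (List (List Int))
  | [], result => some result
  | row :: rest, result =>
    match pvARow row [] with
    | none => none
    | some rows => pvAOuter rest (result ++ [rows])

def createInitialGrid (initialState : List (List String)) : List (List Int) :=
  (pvAOuter initialState []).getD []

-- ===== PORT B =====
-- B: staged passes — validate every cell of the grid first, then convert the whole grid.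
def pvValid (c : String) : Bool :=
  c = "" || (PySem.Str.strIsdigit c &&
    decide (1 ≤ (PySem.Int.ofStr? c).getD 0) && decide ((PySem.Int.ofStr? c).getD 0 ≤ 9))

def pvConv (c : String) : Int :=
  if c = "" then 0 else (PySem.Int.ofStr? c).getD 0

def createInitialGrid_alt (initialState : List (List String)) : List (List Int) :=
  if initialState.all (fun row => row.all pvValid) then
    initialState.map (fun row => row.map pvConv)
  else []
-- ===== PRECONDITION & SPEC =====
def Spec_createInitialGrid (initialState : List (List String)) (out : List (List Int)) : Prop := out = createInitialGrid_alt initialState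
instance (initialState : List (List String)) (out : List (List Int)) : Decidable (Spec_createInitialGrid initialState out) := by unfold Spec_createInitialGrid; infer_instance

-- ===== CLAIM (what is proved, stated in full; the proofs are below) =====
def Claim_equal_createInitialGrid : Prop := ∀ (initialState : List (List String)), Dom_createInitialGrid initialState → Spec_createInitialGrid initialState (createInitialGrid initialState)

-- ===== LEMMAS AND PROOFS =====
theorem pvARow_eq (row : List String) : ∀ (acc : List Int),
    pvARow row acc = if row.all pvValid then some (acc ++ row.map pvConv) else none := by
  induction row with
  | nil => intro acc; simp [pvARow]
  | cons c rest ih =>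
    intro acc
    by_cases hc : c = ""
    · subst hc
      have hv : pvValid "" = true := by simp [pvValid]
      simp [pvARow, ih, hv, pvConv, List.append_assoc]
    · by_cases hg : (PySem.Str.strIsdigit c && decide (1 ≤ (PySem.Int.ofStr? c).getD 0)
          && decide ((PySem.Int.ofStr? c).getD 0 ≤ 9)) = true
      · have hv : pvValid c = true := by simp_all [pvValid]
        have hcv : pvConv c = (PySem.Int.ofStr? c).getD 0 := by simp [pvConv, hc]
        simp only [pvARow, if_neg hc]
        rw [if_pos hg]
        simp [ih, hv, hcv, List.append_assoc]
      · have hv : pvValid c = false := by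
          simp only [pvValid, Bool.or_eq_false_iff, decide_eq_false hc]
          simpa using hg
        simp only [pvARow, if_neg hc]
        rw [if_neg hg]
        simp [hv]

theorem pvAOuter_eq (s : List (List String)) : ∀ (acc : List (List Int)),
    pvAOuter s acc =
      if s.all (fun row => row.all pvValid) then some (acc ++ s.map (fun row => row.map pvConv))
      else none := by
  induction s with
  | nil => intro acc; simp [pvAOuter]
  | cons row rest ih =>
    intro acc
    simp only [pvAOuter, pvARow_eq row []]
    by_cases h1 : row.all pvValid = true
    · simp [h1, ih, List.append_assoc]
    · simp [h1]

-- ===== VERDICT (by name: the statement is the Claim_ definition above) =====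
theorem createInitialGrid_spec : Claim_equal_createInitialGrid := by
  intro s _
  unfold Spec_createInitialGrid createInitialGrid createInitialGrid_alt
  rw [pvAOuter_eq]
  split_ifs <;> simp
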